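-- pv_equiv track=rewrite | github.com/pypi-data/pypi-mirror-79 | packages/docsteady/docsteady-1.2.tar.gz/docsteady-1.2/docsteady/vcd.py | do_req_coverage
-- ===== SOURCE A (Python) =====
-- from collections import Counter
--
-- def do_req_coverage(ves, ve_coverage):
--     """
--     Calculate the coverage level of a requirement
--     based on the downstram verification elements.
--     :param ves:
--     :param ve_coverage:
--     :return:
--     """
--     nves = len(ves)
--     vecount = Counter()
--     for ve in ves:
--         vecount.update([ve_coverage[ve]['coverage']])
--     if vecount['WithFailures'] and vecount['WithFailures'] > 0:
--         rcoverage = "WithFailures"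
--     else:
--         if vecount['FullyVerified'] and vecount['FullyVerified'] == nves:
--             rcoverage = "FullyVerified"
--         else:
--             if vecount["NotVerified"] == nves:
--                 rcoverage = "NotVerified"
--             else:
--                 if vecount['NotCovered'] == nves:
--                     rcoverage = 'NotCovered'
--                 else:
--                     rcoverage = "PartiallyVerified"
--     return rcoverage
-- ===== SOURCE B (Python) =====
-- def do_req_coverage(ves, ve_coverage):
--     """Coverage level as a left fold with a two-argument 'join' lattice merge:
--     WithFailures absorbs, equal labels keep, unequal labels become
--     PartiallyVerified; an empty fold and non-standard uniform labels map at the end."""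
--     acc = None
--     for ve in ves:
--         lab = ve_coverage[ve]['coverage']
--         if acc is None:
--             acc = lab
--         elif acc == 'WithFailures' or lab == 'WithFailures':
--             acc = 'WithFailures'
--         elif acc != lab:
--             acc = 'PartiallyVerified'
--     if acc is None:
--         return 'NotVerified'
--     if acc in ('FullyVerified', 'NotVerified', 'NotCovered', 'WithFailures'):
--         return acc
--     return 'PartiallyVerified'
-- ===== Notes on version B (the rewrite author's own statement) =====
-- stated objective: alternative
-- what changed: Replaces the Counter-of-labels compared count-by-count against len(ves) with a left fold over a two-argument join lattice (WithFailures absorbing, equal labels kept, unequal labels collapsing to PartiallyVerified) followed by a final mapping of the folded label; no counter and no length bookkeeping.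
import Mathlib
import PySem

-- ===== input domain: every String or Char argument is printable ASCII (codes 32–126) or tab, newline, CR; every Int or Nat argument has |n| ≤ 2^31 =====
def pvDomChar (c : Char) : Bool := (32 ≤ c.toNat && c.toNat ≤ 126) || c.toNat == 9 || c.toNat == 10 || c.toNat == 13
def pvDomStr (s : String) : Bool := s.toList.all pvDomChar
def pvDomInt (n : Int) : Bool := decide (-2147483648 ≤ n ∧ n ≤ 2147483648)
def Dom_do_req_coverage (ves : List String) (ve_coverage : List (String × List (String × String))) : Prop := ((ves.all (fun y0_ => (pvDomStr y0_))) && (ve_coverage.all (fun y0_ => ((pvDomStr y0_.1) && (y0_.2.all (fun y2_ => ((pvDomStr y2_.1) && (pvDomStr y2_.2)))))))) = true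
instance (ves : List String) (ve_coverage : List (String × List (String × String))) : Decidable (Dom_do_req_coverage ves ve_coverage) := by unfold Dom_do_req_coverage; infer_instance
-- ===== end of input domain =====

-- B decides the coverage level by a left fold with a two-argument join lattice
-- (WithFailures absorbs, equal labels keep, unequal labels collapse) plus a final
-- mapping, instead of A's Counter compared count-by-count against len(ves). Same O(n).

-- ===== PORT A =====
-- A: build Counter of ve_coverage[ve]['coverage'] over ves, then compare counts against nves.
-- On Pre_ every lookup succeeds, so the getD defaults are never taken.
def do_req_coverage (ves : List String) (ve_coverage : List (String × List (String × String))) : String :=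
  let nves : Int := (ves.length : Int)
  let vecount : PySem.Dict String Int :=
    ves.foldl (fun d ve =>
      d.modify ((PySem.Dict.mk ((PySem.Dict.mk ve_coverage).getD ve [])).getD "coverage" "") 0 (· + 1))
      PySem.Dict.empty
  if vecount.getD "WithFailures" 0 ≠ 0 ∧ vecount.getD "WithFailures" 0 > 0 then "WithFailures"
  else if vecount.getD "FullyVerified" 0 ≠ 0 ∧ vecount.getD "FullyVerified" 0 = nves then "FullyVerified"
  else if vecount.getD "NotVerified" 0 = nves then "NotVerified"
  else if vecount.getD "NotCovered" 0 = nves then "NotCovered"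
  else "PartiallyVerified"

-- ===== PORT B =====
-- B's join merge of two labels (the elif chain of Source B's loop body)
def pvJoin (a lab : String) : String :=
  if a = "WithFailures" ∨ lab = "WithFailures" then "WithFailures"
  else if a ≠ lab then "PartiallyVerified"
  else a

-- B: fold the labels through pvJoin starting from none, then map the folded label.
def do_req_coverage_alt (ves : List String) (ve_coverage : List (String × List (String × String))) : String :=
  let acc : Option String :=
    ves.foldl (fun acc ve =>
      let lab := (PySem.Dict.mk ((PySem.Dict.mk ve_coverage).getD ve [])).getD "coverage" ""
      match acc with
      | none => some lab
      | some a => some (pvJoin a lab)) none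
  match acc with
  | none => "NotVerified"
  | some a =>
    if a = "FullyVerified" ∨ a = "NotVerified" ∨ a = "NotCovered" ∨ a = "WithFailures" then a
    else "PartiallyVerified"

-- ===== PRECONDITION & SPEC =====
-- the label Python reads for ve: none exactly where A (and B) raise KeyError
def pvCovOf (ve_coverage : List (String × List (String × String))) (ve : String) : Option String :=
  ((PySem.Dict.mk ve_coverage).get? ve).bind (fun kvs => (PySem.Dict.mk kvs).get? "coverage")

-- Pre_ excludes exactly the inputs where Python raises KeyError: some ve missing from
-- ve_coverage, or its dict lacking the 'coverage' key.
def Pre_do_req_coverage (ves : List String) (ve_coverage : List (String × List (String × String))) : Prop :=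
  ∀ ve ∈ ves, (pvCovOf ve_coverage ve).isSome
instance (ves : List String) (ve_coverage : List (String × List (String × String))) : Decidable (Pre_do_req_coverage ves ve_coverage) := by unfold Pre_do_req_coverage; infer_instance

def pvWitness_do_req_coverage : List String × (List (String × List (String × String))) :=
  (["VE1", "VE2"], [("VE1", [("coverage", "FullyVerified")]), ("VE2", [("coverage", "NotVerified")])])

def Spec_do_req_coverage (ves : List String) (ve_coverage : List (String × List (String × String))) (out : String) : Prop := out = do_req_coverage_alt ves ve_coverage
instance (ves : List String) (ve_coverage : List (String × List (String × String))) (out : String) : Decidable (Spec_do_req_coverage ves ve_coverage out) := by unfold Spec_do_req_coverage; infer_instance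

-- ===== CLAIM (what is proved, stated in full; the proofs are below) =====
def Claim_equal_do_req_coverage : Prop := ∀ (ves : List String) (ve_coverage : List (String × List (String × String))), Dom_do_req_coverage ves ve_coverage → Pre_do_req_coverage ves ve_coverage → Spec_do_req_coverage ves ve_coverage (do_req_coverage ves ve_coverage)

-- ===== LEMMAS AND PROOFS =====

-- the fold of B, re-expressed over the label list: from a `some` seed it is foldl pvJoin
lemma foldOpt_some (t : List String) : ∀ a : String,
    t.foldl (fun acc lab => match acc with | none => some lab | some a => some (pvJoin a lab)) (some a)
      = some (t.foldl pvJoin a) := by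
  induction t with
  | nil => intro a; rfl
  | cons b t ih => intro a; simpa using ih (pvJoin a b)

lemma pvJoin_self (a : String) : pvJoin a a = a := by
  unfold pvJoin; split_ifs with h h2 <;> simp_all

-- joining equals "WithFailures" iff a failure is already present
lemma foldl_join_eq_WF (t : List String) : ∀ a : String,
    t.foldl pvJoin a = "WithFailures" ↔ (a = "WithFailures" ∨ "WithFailures" ∈ t) := by
  induction t with
  | nil => intro a; simp
  | cons b t ih =>
    intro a
    have hstep : pvJoin a b = "WithFailures" ↔ (a = "WithFailures" ∨ b = "WithFailures") := by
      unfold pvJoin; split_ifs with h h2 <;> simp_all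
    simp only [List.foldl_cons, ih, hstep, List.mem_cons]
    tauto
  
-- without failures, a uniform list folds to its seed
lemma foldl_join_const (t : List String) : ∀ a : String, (∀ y ∈ t, y = a) →
    t.foldl pvJoin a = a := by
  induction t with
  | nil => intro a _; rfl
  | cons b t ih =>
    intro a h
    have hb : b = a := h b (by simp)
    subst hb
    simp only [List.foldl_cons, pvJoin_self]
    exact ih b (fun y hy => h y (by simp [hy]))

-- "PartiallyVerified" is a sink under pvJoin when no failure occurs
lemma foldl_join_PV (t : List String) (hWF : "WithFailures" ∉ t) :
    t.foldl pvJoin "PartiallyVerified" = "PartiallyVerified" := by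
  induction t with
  | nil => rfl
  | cons b t ih =>
    have hb : b ≠ "WithFailures" := fun h => hWF (by simp [h])
    have hstep : pvJoin "PartiallyVerified" b = "PartiallyVerified" := by
      unfold pvJoin; split_ifs with h h2 <;> simp_all
    simp only [List.foldl_cons, hstep]
    exact ih (fun h => hWF (by simp [h]))

-- mixed labels with no failure fold to "PartiallyVerified"
lemma foldl_join_mixed (t : List String) : ∀ a : String, a ≠ "WithFailures" →
    "WithFailures" ∉ t → ¬(∀ y ∈ t, y = a) →
    t.foldl pvJoin a = "PartiallyVerified" := by
  induction t with
  | nil => intro a _ _ h; exact absurd (by simp) h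
  | cons b t ih =>
    intro a ha hWF hmix
    have hbWF : b ≠ "WithFailures" := fun h => hWF (by simp [h])
    have hWFt : "WithFailures" ∉ t := fun h => hWF (by simp [h])
    by_cases hb : b = a
    · subst hb
      have hmt : ¬(∀ y ∈ t, y = b) := fun h => hmix (by
        intro y hy; rcases List.mem_cons.mp hy with rfl | hy; rfl; exact h y hy)
      simp only [List.foldl_cons, pvJoin_self]
      exact ih b ha hWFt hmt
    · have hstep : pvJoin a b = "PartiallyVerified" := by
        unfold pvJoin; split_ifs with h h2 <;> simp_all
      simp only [List.foldl_cons, hstep]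
      exact foldl_join_PV t hWFt

-- the common core: A's Counter decision equals B's fold-join decision, for any label list L
lemma classify_eq (L : List String) :
    (if (PySem.Dict.counter L).getD "WithFailures" 0 ≠ 0 ∧ (PySem.Dict.counter L).getD "WithFailures" 0 > 0 then "WithFailures"
     else if (PySem.Dict.counter L).getD "FullyVerified" 0 ≠ 0 ∧ (PySem.Dict.counter L).getD "FullyVerified" 0 = (L.length : Int) then "FullyVerified"
     else if (PySem.Dict.counter L).getD "NotVerified" 0 = (L.length : Int) then "NotVerified"
     else if (PySem.Dict.counter L).getD "NotCovered" 0 = (L.length : Int) then "NotCovered"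
     else "PartiallyVerified")
    =
    (match L.foldl (fun acc lab => match acc with | none => some lab | some a => some (pvJoin a lab)) none with
     | none => "NotVerified"
     | some a =>
       if a = "FullyVerified" ∨ a = "NotVerified" ∨ a = "NotCovered" ∨ a = "WithFailures" then a
       else "PartiallyVerified") := by
  have hc : ∀ x : String, (PySem.Dict.counter L).getD x 0 = (L.count x : Int) :=
    fun x => PySem.Dict.getD_counter L x
  have hcnt_len : ∀ x : String, ((L.count x : Int) = (L.length : Int)) ↔ ∀ y ∈ L, y = x := by
    intro x
    rw [Int.natCast_inj, List.count_eq_length]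
    constructor <;> intro h y hy <;> exact (h y hy).symm
  cases L with
  | nil => simp [hc]
  | cons h0 t =>
    simp only [List.foldl_cons, foldOpt_some]
    set L := h0 :: t with hL
    have hlenpos : 0 < L.length := by simp [hL]
    by_cases hwf : "WithFailures" ∈ L
    · have hpos : 0 < L.count "WithFailures" := List.count_pos_iff.mpr hwf
      have hAcond : (PySem.Dict.counter L).getD "WithFailures" 0 ≠ 0 ∧
          (PySem.Dict.counter L).getD "WithFailures" 0 > 0 := by
        rw [hc]; omega
      have hBj : t.foldl pvJoin h0 = "WithFailures" := by
        rw [foldl_join_eq_WF]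
        rcases List.mem_cons.mp hwf with h | h
        · exact Or.inl h.symm
        · exact Or.inr h
      rw [if_pos hAcond, hBj]
      simp
    · have hh0 : h0 ≠ "WithFailures" := fun h => hwf (by simp [hL, h])
      have hWFt : "WithFailures" ∉ t := fun h => hwf (by simp [hL, h])
      have hcwf : (PySem.Dict.counter L).getD "WithFailures" 0 = 0 := by
        rw [hc, List.count_eq_zero.mpr hwf]; rfl
      rw [if_neg (by rw [hcwf]; omega)]
      by_cases hall : ∀ y ∈ t, y = h0
      · have hallL : ∀ y ∈ L, y = h0 := by
          intro y hy; rcases List.mem_cons.mp hy with rfl | hy; rfl; exact hall y hy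
        have hBj : t.foldl pvJoin h0 = h0 := foldl_join_const t h0 hall
        rw [hBj]
        have hcount_eq : ((L.count h0 : Int) = (L.length : Int)) := (hcnt_len h0).mpr hallL
        have hcount_ne : ∀ x : String, x ≠ h0 → (PySem.Dict.counter L).getD x 0 = 0 := by
          intro x hx
          rw [hc, List.count_eq_zero.mpr (fun hm => hx (hallL x hm))]; rfl
        have hpos0 : (0:Int) < (L.count h0 : Int) := by
          have := List.count_pos_iff.mpr (show h0 ∈ L by simp [hL])
          exact_mod_cast this
        by_cases hFV : h0 = "FullyVerified"
        · subst hFV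
          rw [if_pos ⟨by rw [hc]; omega, by rw [hc]; exact hcount_eq⟩]
          simp
        · rw [if_neg (by
            rw [hcount_ne "FullyVerified" (fun h => hFV h.symm)]
            intro hcon; exact hcon.1 rfl)]
          by_cases hNV : h0 = "NotVerified"
          · subst hNV
            rw [if_pos (by rw [hc]; exact hcount_eq)]
            simp
          · rw [if_neg (by
              rw [hcount_ne "NotVerified" (fun h => hNV h.symm)]
              intro hcon; omega)]
            by_cases hNC : h0 = "NotCovered"
            · subst hNC
              rw [if_pos (by rw [hc]; exact hcount_eq)]
              simp
            · rw [if_neg (by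
                rw [hcount_ne "NotCovered" (fun h => hNC h.symm)]
                intro hcon; omega)]
              rw [if_neg (by
                push Not
                refine ⟨fun h => hFV h, fun h => hNV h, fun h => hNC h, hh0⟩)]
      · -- mixed, no failures
        have hBj : t.foldl pvJoin h0 = "PartiallyVerified" :=
          foldl_join_mixed t h0 hh0 hWFt hall
        rw [hBj]
        have hne : ∀ x : String, ¬((L.count x : Int) = (L.length : Int)) := by
          intro x hx
          have hallx := (hcnt_len x).mp hx
          have hx0 : h0 = x := hallx h0 (by simp [hL])
          subst hx0
          exact hall (fun y hy => hallx y (by simp [hL, hy]))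
        rw [if_neg (by rw [hc]; intro hcon; exact hne _ hcon.2)]
        rw [if_neg (by rw [hc]; exact hne _)]
        rw [if_neg (by rw [hc]; exact hne _)]
        simp

-- ===== VERDICT (by name: the statement is the Claim_ definition above) =====
theorem do_req_coverage_spec : Claim_equal_do_req_coverage := by
  intro ves vc _ _
  unfold Spec_do_req_coverage do_req_coverage do_req_coverage_alt
  have hfold : ves.foldl (fun d ve =>
        d.modify ((PySem.Dict.mk ((PySem.Dict.mk vc).getD ve [])).getD "coverage" "") 0 (· + 1))
        PySem.Dict.empty
      = PySem.Dict.counter (ves.map (fun ve =>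
        (PySem.Dict.mk ((PySem.Dict.mk vc).getD ve [])).getD "coverage" "")) := by
    rw [PySem.Dict.counter_eq_foldl, List.foldl_map]
  have hbfold : ves.foldl (fun acc ve =>
        match acc with
        | none => some ((PySem.Dict.mk ((PySem.Dict.mk vc).getD ve [])).getD "coverage" "")
        | some a => some (pvJoin a ((PySem.Dict.mk ((PySem.Dict.mk vc).getD ve [])).getD "coverage" "")) ) none
      = (ves.map (fun ve =>
        (PySem.Dict.mk ((PySem.Dict.mk vc).getD ve [])).getD "coverage" "")).foldl
        (fun acc lab => match acc with | none => some lab | some a => some (pvJoin a lab)) none := by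
    rw [List.foldl_map]
  have hlen : (ves.length : Int) = ((ves.map (fun ve =>
      (PySem.Dict.mk ((PySem.Dict.mk vc).getD ve [])).getD "coverage" "")).length : Int) := by simp
  simp only [hfold, hbfold, hlen]
  exact classify_eq _
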